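-- pv_equiv track=rewrite | github.com/mahetoodang/abm | functionality/path_finder.py | out_of_bounds
-- ===== SOURCE A (Python) =====
-- def out_of_bounds(path, bounds):
--     out = False
--     pos = [0, 0]
--     for step in path:
--         pos = [
--             pos[0] + step[0],
--             pos[1] + step[1]
--         ]
--         # x_out = not (bounds[0][0] <= pos[0] <= bounds[1][0])
--         # y_out = not (bounds[0][1] <= pos[1] <= bounds[1][1])
--         x_out = pos[0] < bounds[0][0] or pos[0] > bounds[1][0]
--         y_out = pos[1] < bounds[0][1] or pos[1] > bounds[1][1]
--         if x_out or y_out: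
--             out = True
--             break
--     return out
-- ===== SOURCE B (Python) =====
-- def out_of_bounds(path, bounds):
--     if not path:
--         return False
--     xs = []
--     ys = []
--     x = y = 0
--     for step in path:
--         x += step[0]
--         y += step[1]
--         xs.append(x)
--         ys.append(y)
--     return (min(xs) < bounds[0][0] or max(xs) > bounds[1][0]
--             or min(ys) < bounds[0][1] or max(ys) > bounds[1][1])
-- ===== Notes on version B (the rewrite author's own statement) =====
-- stated objective: alternative
-- what changed: B builds the whole cumulative trajectory (two prefix-sum lists) and reduces it with min/max against the bounds, instead of A's per-step bounds check with an early break.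
-- outside the precondition, e.g. on out_of_bounds([[5, 0], [0]], [[0, 0], [1, 1]]): A returns True, B raises IndexError
import Mathlib
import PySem

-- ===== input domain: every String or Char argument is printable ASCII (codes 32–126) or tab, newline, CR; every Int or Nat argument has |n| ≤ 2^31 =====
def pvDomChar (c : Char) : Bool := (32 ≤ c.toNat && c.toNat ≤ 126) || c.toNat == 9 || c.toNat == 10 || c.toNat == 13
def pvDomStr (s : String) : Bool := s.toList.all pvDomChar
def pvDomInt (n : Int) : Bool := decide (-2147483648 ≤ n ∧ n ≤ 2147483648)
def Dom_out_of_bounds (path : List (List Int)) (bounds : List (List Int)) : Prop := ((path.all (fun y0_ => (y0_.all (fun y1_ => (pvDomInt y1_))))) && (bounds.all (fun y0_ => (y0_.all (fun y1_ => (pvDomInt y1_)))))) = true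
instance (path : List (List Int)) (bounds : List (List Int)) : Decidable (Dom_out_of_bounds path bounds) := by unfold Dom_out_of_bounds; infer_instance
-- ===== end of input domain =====

-- B replaces A's per-step bounds check with an early break by building the whole cumulative
-- trajectory (two prefix-sum lists) and reducing it with min/max (objective: alternative).

-- ===== PORT A =====
-- the for-loop with its early 'break'; pyGetD is exact under Pre_ (all indexing in range there)
def outOfBoundsGo (bounds : List (List Int)) : List (List Int) → Int → Int → Bool
  | [], _, _ => false
  | step :: rest, px, py =>
    let nx := px + PySem.List.pyGetD step 0 0
    let ny := py + PySem.List.pyGetD step 1 0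
    let xOut := decide (nx < PySem.List.pyGetD (PySem.List.pyGetD bounds 0 []) 0 0) ||
                decide (nx > PySem.List.pyGetD (PySem.List.pyGetD bounds 1 []) 0 0)
    let yOut := decide (ny < PySem.List.pyGetD (PySem.List.pyGetD bounds 0 []) 1 0) ||
                decide (ny > PySem.List.pyGetD (PySem.List.pyGetD bounds 1 []) 1 0)
    if xOut || yOut then true else outOfBoundsGo bounds rest nx ny

def out_of_bounds (path : List (List Int)) (bounds : List (List Int)) : Bool :=
  outOfBoundsGo bounds path 0 0

-- ===== PORT B =====
-- Source B's accumulation loop: builds the two prefix-sum lists xs, ys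
def prefixSums : List (List Int) → Int → Int → List Int × List Int
  | [], _, _ => ([], [])
  | step :: rest, x, y =>
    let nx := x + PySem.List.pyGetD step 0 0
    let ny := y + PySem.List.pyGetD step 1 0
    let p := prefixSums rest nx ny
    (nx :: p.1, ny :: p.2)

-- Python min/max on a list (called only on nonempty lists; .getD 0 is the totality default)
def out_of_bounds_alt (path : List (List Int)) (bounds : List (List Int)) : Bool :=
  if path.isEmpty then false
  else
    let p := prefixSums path 0 0
    decide ((PySem.List.min? p.1 (fun v => v)).getD 0 < PySem.List.pyGetD (PySem.List.pyGetD bounds 0 []) 0 0) ||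
    decide ((PySem.List.max? p.1 (fun v => v)).getD 0 > PySem.List.pyGetD (PySem.List.pyGetD bounds 1 []) 0 0) ||
    decide ((PySem.List.min? p.2 (fun v => v)).getD 0 < PySem.List.pyGetD (PySem.List.pyGetD bounds 0 []) 1 0) ||
    decide ((PySem.List.max? p.2 (fun v => v)).getD 0 > PySem.List.pyGetD (PySem.List.pyGetD bounds 1 []) 1 0)

-- ===== PRECONDITION & SPEC =====
-- Pre_ excludes the inputs on which the Python A raises an IndexError (a step or bounds row
-- shorter than 2 while accessed); it also excludes inputs where a malformed step sits AFTER the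
-- step at which A breaks (A then returns True but B's full pass raises) — see claim cites.
def Pre_out_of_bounds (path : List (List Int)) (bounds : List (List Int)) : Prop :=
  path = [] ∨ ((∀ s ∈ path, 2 ≤ s.length) ∧ 2 ≤ bounds.length ∧ ∀ b ∈ bounds.take 2, 2 ≤ b.length)
instance (path : List (List Int)) (bounds : List (List Int)) : Decidable (Pre_out_of_bounds path bounds) := by unfold Pre_out_of_bounds; infer_instance

def pvWitness_out_of_bounds : List (List Int) × List (List Int) := ([[1, 0], [0, 1]], [[0, 0], [2, 2]])

def Spec_out_of_bounds (path : List (List Int)) (bounds : List (List Int)) (out : Bool) : Prop := out = out_of_bounds_alt path bounds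
instance (path : List (List Int)) (bounds : List (List Int)) (out : Bool) : Decidable (Spec_out_of_bounds path bounds out) := by unfold Spec_out_of_bounds; infer_instance

-- ===== CLAIM (what is proved, stated in full; the proofs are below) =====
def Claim_equal_out_of_bounds : Prop := ∀ (path : List (List Int)) (bounds : List (List Int)), Dom_out_of_bounds path bounds → Pre_out_of_bounds path bounds → Spec_out_of_bounds path bounds (out_of_bounds path bounds)

-- ===== LEMMAS AND PROOFS =====

def bLo (bounds : List (List Int)) (j : Int) : Int :=
  PySem.List.pyGetD (PySem.List.pyGetD bounds 0 []) j 0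
def bHi (bounds : List (List Int)) (j : Int) : Int :=
  PySem.List.pyGetD (PySem.List.pyGetD bounds 1 []) j 0

-- any distributes over ||
theorem any_or_split (xs : List Int) (f g : Int → Bool) :
    xs.any (fun v => f v || g v) = (xs.any f || xs.any g) := by
  induction xs with
  | nil => simp
  | cons a t ih =>
    simp only [List.any_cons, ih]
    cases f a <;> cases g a <;> simp

-- running min vs any
theorem foldl_min_lt (c : Int) : ∀ (t : List Int) (x : Int),
    decide (t.foldl min x < c) = (x :: t).any (fun v => decide (v < c)) := by
  intro t
  induction t with
  | nil => intro x; simp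
  | cons y r ih =>
    intro x
    rw [List.foldl_cons, ih (min x y)]
    simp only [List.any_cons]
    by_cases hx : x < c <;> by_cases hy : y < c <;>
      simp [hx, hy]

-- running max vs any
theorem foldl_max_gt (c : Int) : ∀ (t : List Int) (x : Int),
    decide (c < t.foldl max x) = (x :: t).any (fun v => decide (c < v)) := by
  intro t
  induction t with
  | nil => intro x; simp
  | cons y r ih =>
    intro x
    rw [List.foldl_cons, ih (max x y)]
    simp only [List.any_cons]
    by_cases hx : c < x <;> by_cases hy : c < y <;>
      simp [hx, hy]

-- A's loop equals "some prefix position violates a bound", over B's prefix-sum lists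
theorem go_eq_any (bounds : List (List Int)) : ∀ (rest : List (List Int)) (px py : Int),
    outOfBoundsGo bounds rest px py =
      ((prefixSums rest px py).1.any (fun v => decide (v < bLo bounds 0) || decide (v > bHi bounds 0)) ||
       (prefixSums rest px py).2.any (fun v => decide (v < bLo bounds 1) || decide (v > bHi bounds 1))) := by
  intro rest
  induction rest with
  | nil => intro px py; simp [outOfBoundsGo, prefixSums]
  | cons s r ih =>
    intro px py
    simp only [outOfBoundsGo, prefixSums, List.any_cons, bLo, bHi] at ih ⊢
    simp only [gt_iff_lt] at ih ⊢
    rw [ih]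
    split
    next h =>
      simp only [Bool.or_eq_true] at h
      rcases h with (h | h) | (h | h) <;> simp [of_decide_eq_true h]
    next h =>
      simp only [Bool.or_eq_true, not_or, Bool.not_eq_true] at h
      rcases h with ⟨⟨h1, h2⟩, h3, h4⟩
      simp only [decide_eq_false_iff_not] at h1 h2 h3 h4
      simp [h1, h2, h3, h4]

theorem main_eq (path bounds : List (List Int)) :
    out_of_bounds path bounds = out_of_bounds_alt path bounds := by
  cases path with
  | nil => rfl
  | cons s r =>
    unfold out_of_bounds out_of_bounds_alt
    rw [go_eq_any]
    simp only [prefixSums, List.isEmpty_cons, Bool.false_eq_true, if_false,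
      PySem.List.min?_id_cons, PySem.List.max?_id_cons, Option.getD_some, bLo, bHi]
    rw [foldl_min_lt, foldl_max_gt, foldl_min_lt, foldl_max_gt]
    simp only [any_or_split, Bool.or_assoc, gt_iff_lt]
    rfl

-- ===== VERDICT (by name: the statement is the Claim_ definition above) =====
theorem out_of_bounds_spec : Claim_equal_out_of_bounds := by
  intro path bounds _ _
  exact main_eq path bounds
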